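-- pv_equiv track=rewrite | github.com/MieszkoMakuch/fakenews-detector | fakenews_detector/fake_fact_ai/feature.py | numOfContUpperCase
-- ===== SOURCE A (Python) =====
-- def numOfContUpperCase(input):
--     res = 0;
--     state = False
--     for i in range(1, len(input)):
--         if input[i].isupper():
--             if input[i - 1].isupper():
--                 if state:
--                     pass
--                 else:
--                     state = True
--                     res += 1
--             else:
--                 state = False
--                 pass
--         else:
--             state = False
--     return res
--     pass
-- ===== SOURCE B (Python) =====
-- def numOfContUpperCase(input):
--     count = 0
--     i = 0
--     n = len(input)
--     while i < n:
--         if input[i].isupper():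
--             j = i + 1
--             while j < n and input[j].isupper():
--                 j += 1
--             if j - i >= 2:
--                 count += 1
--             i = j
--         else:
--             i += 1
--     return count
-- ===== Notes on version B (the rewrite author's own statement) =====
-- stated objective: alternative
-- what changed: Replaced A's index loop with a seen-a-run boolean flag by an explicit run scanner: an outer loop that, on an uppercase character, scans to the end of the maximal uppercase run with an inner loop, counts it if its length is at least 2, and resumes after the run.
import Mathlib
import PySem

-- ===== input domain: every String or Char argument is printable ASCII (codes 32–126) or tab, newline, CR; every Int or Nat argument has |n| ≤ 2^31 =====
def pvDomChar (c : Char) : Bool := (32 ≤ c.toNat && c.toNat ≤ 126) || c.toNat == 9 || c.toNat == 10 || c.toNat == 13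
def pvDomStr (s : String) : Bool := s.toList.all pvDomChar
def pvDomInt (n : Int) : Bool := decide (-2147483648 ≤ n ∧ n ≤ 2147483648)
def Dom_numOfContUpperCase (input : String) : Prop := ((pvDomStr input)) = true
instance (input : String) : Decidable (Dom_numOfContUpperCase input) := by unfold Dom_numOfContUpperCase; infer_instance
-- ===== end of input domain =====

-- ===== PORT A =====
-- B re-implements A's flag state machine as a scan over maximal uppercase runs; return values proved equal (objective: alternative decomposition).
def numOfContUpperCase (input : String) : Int :=
  let cs := input.toList
  -- for i in range(1, len(input)): … input[i] … input[i-1] …  (state = (res, state));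
  -- pyGetD's default is never read: every index in the range is in bounds.
  ((PySem.List.pyRange 1 (PySem.Str.len input) 1).foldl
    (fun (st : Int × Bool) i =>
      if PySem.Chars.isupper (PySem.List.pyGetD cs i ' ') then
        if PySem.Chars.isupper (PySem.List.pyGetD cs (i - 1) ' ') then
          if st.2 then st else (st.1 + 1, true)
        else (st.1, false)
      else (st.1, false))
    ((0 : Int), false)).1

-- ===== PORT B =====
-- Source B's outer while-loop: at an uppercase char, the inner while-loop scans to the end of the
-- run (takeWhile/dropWhile), counts it if its length ≥ 2, and resumes after the run.
def pvAltGo : List Char → Int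
  | [] => 0
  | c :: rest =>
    if PySem.Chars.isupper c then
      (if (rest.takeWhile PySem.Chars.isupper).length + 1 ≥ 2 then 1 else 0)
        + pvAltGo (rest.dropWhile PySem.Chars.isupper)
    else pvAltGo rest
termination_by l => l.length
decreasing_by
  · exact Nat.lt_succ_of_le (List.length_dropWhile_le _ _)
  · exact Nat.lt_succ_of_le (Nat.le_refl _)

def numOfContUpperCase_alt (input : String) : Int := pvAltGo input.toList

-- ===== PRECONDITION & SPEC =====
def Spec_numOfContUpperCase (input : String) (out : Int) : Prop := out = numOfContUpperCase_alt input
instance (input : String) (out : Int) : Decidable (Spec_numOfContUpperCase input out) := by unfold Spec_numOfContUpperCase; infer_instance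

-- ===== CLAIM (what is proved, stated in full; the proofs are below) =====
def Claim_equal_numOfContUpperCase : Prop := ∀ (input : String), Dom_numOfContUpperCase input → Spec_numOfContUpperCase input (numOfContUpperCase input)

-- ===== LEMMAS AND PROOFS =====

-- A's loop body, as a step function on ((res, state), (prev, cur)).
def pvStep (st : Int × Bool) (pc : Char × Char) : Int × Bool :=
  if PySem.Chars.isupper pc.2 then
    if PySem.Chars.isupper pc.1 then
      if st.2 then st else (st.1 + 1, true)
    else (st.1, false)
  else (st.1, false)

-- Count contributed by A's machine from previous char p and flag state over the remaining chars.
def pvG (p : Char) (state : Bool) : List Char → Int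
  | [] => 0
  | c :: t =>
    if PySem.Chars.isupper c then
      if PySem.Chars.isupper p then
        if state then pvG c state t else 1 + pvG c true t
      else pvG c false t
    else pvG c false t

lemma pvFoldl_zip (t : List Char) : ∀ (p : Char) (res : Int) (state : Bool),
    (((p :: t).zip t).foldl pvStep (res, state)).1 = res + pvG p state t := by
  induction t with
  | nil => intro p res state; simp [pvG]
  | cons c t ih =>
    intro p res state
    show (((c :: t).zip t).foldl pvStep (pvStep (res, state) (p, c))).1 = _
    by_cases hc : PySem.Chars.isupper c = true <;>
      by_cases hp : PySem.Chars.isupper p = true <;>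
      cases state <;>
      (simp [pvStep, pvG, hc, hp, ih]; try ring)

lemma pvG_altGo (t : List Char) :
    (∀ p, pvG p false t = pvAltGo (p :: t)) ∧
    (∀ c, PySem.Chars.isupper c = true → pvG c true t = pvAltGo (t.dropWhile PySem.Chars.isupper)) := by
  induction t with
  | nil =>
    constructor
    · intro p; simp [pvG, pvAltGo]
    · intro c _; simp [pvG, pvAltGo]
  | cons d t ih =>
    constructor
    · intro p
      by_cases hd : PySem.Chars.isupper d = true <;> by_cases hp : PySem.Chars.isupper p = true
      · rw [show pvG p false (d :: t) = 1 + pvG d true t by simp [pvG, hd, hp]]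
        rw [ih.2 d hd]
        simp [pvAltGo, hd, hp]
      · rw [show pvG p false (d :: t) = pvG d false t by simp [pvG, hd, hp]]
        rw [ih.1 d]
        simp [pvAltGo, hp]
      · rw [show pvG p false (d :: t) = pvG d false t by simp [pvG, hd]]
        rw [ih.1 d]
        simp [pvAltGo, hd, hp]
      · rw [show pvG p false (d :: t) = pvG d false t by simp [pvG, hd]]
        rw [ih.1 d]
        simp [pvAltGo, hp]
    · intro c hcu
      by_cases hd : PySem.Chars.isupper d = true
      · rw [show pvG c true (d :: t) = pvG d true t by simp [pvG, hd, hcu]]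
        rw [ih.2 d hd]
        simp [hd]
      · rw [show pvG c true (d :: t) = pvG d false t by simp [pvG, hd]]
        rw [ih.1 d]
        simp [hd]

-- The index pairs A reads are exactly the adjacent pairs of the char list.
lemma pvMap_pairs (cs : List Char) :
    (PySem.List.pyRange 1 (cs.length : Int) 1).map
        (fun i => (PySem.List.pyGetD cs (i - 1) ' ', PySem.List.pyGetD cs i ' '))
      = cs.zip cs.tail := by
  rw [PySem.List.pyRange_one, List.map_map]
  apply List.ext_getElem
  · simp [List.length_zip]
  · intro k h1 h2
    have hk1 : k + 1 < cs.length := by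
      simp [List.length_zip] at h2; omega
    have e1 : (1 : Int) + (k : Int) - 1 = ((k : Nat) : Int) := by ring
    have e2 : (1 : Int) + (k : Int) = (((k + 1 : Nat)) : Int) := by push_cast [Nat.cast_add]; ring
    simp only [List.getElem_map, List.getElem_range, Function.comp]
    rw [e1, e2, PySem.List.pyGetD_natCast, PySem.List.pyGetD_natCast]
    have hk : k < cs.length := by omega
    have htail : k < cs.tail.length := by simp [List.length_tail]; omega
    rw [List.getElem_zip]
    rw [List.getD_eq_getElem _ _ hk, List.getD_eq_getElem _ _ hk1]
    congr 1
    rw [List.getElem_tail]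

lemma pvA_eq_zip (input : String) :
    numOfContUpperCase input
      = ((input.toList.zip input.toList.tail).foldl pvStep ((0 : Int), false)).1 := by
  unfold numOfContUpperCase
  rw [show PySem.Str.len input = (input.toList.length : Int) from PySem.Str.len_eq input]
  rw [← pvMap_pairs input.toList, List.foldl_map]
  rfl

-- ===== VERDICT (by name: the statement is the Claim_ definition above) =====
theorem numOfContUpperCase_spec : Claim_equal_numOfContUpperCase := by
  intro input _
  show numOfContUpperCase input = numOfContUpperCase_alt input
  rw [pvA_eq_zip]
  unfold numOfContUpperCase_alt
  cases h : input.toList with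
  | nil => simp [pvAltGo]
  | cons p t =>
    show (((p :: t).zip t).foldl pvStep ((0 : Int), false)).1 = _
    rw [pvFoldl_zip t p 0 false, (pvG_altGo t).1 p]
    ring
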